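-- pv_equiv track=rewrite | github.com/GUIDesignResearch/GUIGAN | code/comm.py | get_template_T
-- ===== SOURCE A (Python) =====
-- def get_template_T(ui_n,ui_tree):
--     subtrees_count = 0
--     templates_list = []
--     templates_dict = {}
--     for (k,v) in ui_tree.items():
--         subtrees_count+=1
--         if v not in templates_list:
--             templates_list.append(v)
--             templates_dict[v] = [ui_n+','+k]
--         else:
--             templates_dict[v].append(ui_n+','+k)
--     return subtrees_count,templates_list,templates_dict
-- ===== SOURCE B (Python) =====
-- def get_template_T(ui_n, ui_tree):
--     order = list(dict.fromkeys(ui_tree.values()))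
--     groups = {v: [ui_n + ',' + k for k, x in ui_tree.items() if x == v] for v in order}
--     return len(ui_tree), order, groups
-- ===== Notes on version B (the rewrite author's own statement) =====
-- stated objective: alternative
-- what changed: Staged passes replace A's single incremental loop: first dedup the template values in first-seen order (dict.fromkeys), then build each group by a separate filtering comprehension over the tree; no first-seen branch and no incremental appends.
import Mathlib
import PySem

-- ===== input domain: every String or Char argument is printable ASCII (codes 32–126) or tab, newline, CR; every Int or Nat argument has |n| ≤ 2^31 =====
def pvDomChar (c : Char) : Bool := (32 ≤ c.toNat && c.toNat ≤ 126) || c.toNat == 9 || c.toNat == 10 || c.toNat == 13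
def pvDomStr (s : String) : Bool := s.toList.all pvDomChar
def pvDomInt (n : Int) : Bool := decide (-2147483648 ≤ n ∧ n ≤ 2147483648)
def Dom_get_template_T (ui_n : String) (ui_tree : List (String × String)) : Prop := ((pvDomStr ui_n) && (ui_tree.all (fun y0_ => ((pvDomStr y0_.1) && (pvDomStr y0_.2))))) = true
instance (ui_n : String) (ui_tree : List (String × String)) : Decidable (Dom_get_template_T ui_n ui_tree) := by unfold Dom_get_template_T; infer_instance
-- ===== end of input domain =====

-- B replaces A's single incremental loop by staged passes: dedup the values in first-seen
-- order, then build each group by a separate filtering comprehension (objective: alternative).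


-- ===== PORT A =====
def get_template_T (ui_n : String) (ui_tree : List (String × String)) : Int × List String × (List (String × List String)) :=
  let st := ui_tree.foldl
    (fun (st : Int × List String × PySem.Dict String (List String)) kv =>
      let c := st.1 + 1
      if kv.2 ∉ st.2.1 then
        (c, st.2.1 ++ [kv.2], st.2.2.insert kv.2 [ui_n ++ "," ++ kv.1])
      else
        (c, st.2.1, st.2.2.modify kv.2 [] (· ++ [ui_n ++ "," ++ kv.1])))
    (0, [], PySem.Dict.empty)
  (st.1, st.2.1, st.2.2.items)

-- ===== PORT B =====
def get_template_T_alt (ui_n : String) (ui_tree : List (String × String)) : Int × List String × (List (String × List String)) :=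
  let order := PySem.List.dedup (ui_tree.map (·.2))          -- list(dict.fromkeys(ui_tree.values()))
  let groups := order.map (fun v =>
    (v, (ui_tree.filter (fun kv => kv.2 == v)).map (fun kv => ui_n ++ "," ++ kv.1)))
  ((ui_tree.length : Int), order, groups)

-- ===== PRECONDITION & SPEC =====
def Spec_get_template_T (ui_n : String) (ui_tree : List (String × String)) (out : Int × List String × (List (String × List String))) : Prop := out = get_template_T_alt ui_n ui_tree
instance (ui_n : String) (ui_tree : List (String × String)) (out : Int × List String × (List (String × List String))) : Decidable (Spec_get_template_T ui_n ui_tree out) := by unfold Spec_get_template_T; infer_instance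

-- ===== CLAIM (what is proved, stated in full; the proofs are below) =====
def Claim_equal_get_template_T : Prop := ∀ (ui_n : String) (ui_tree : List (String × String)), Dom_get_template_T ui_n ui_tree → Spec_get_template_T ui_n ui_tree (get_template_T ui_n ui_tree)

-- ===== LEMMAS AND PROOFS =====

-- A's loop, with its list invariantly equal to the dict's key list, computes the same dict as
-- a plain modify-append fold, together with its keys and the running count plus the items left.
theorem get_template_T_loop_eq (ui_n : String) (xs : List (String × String)) :
    ∀ (c : Int) (l : List String) (d : PySem.Dict String (List String)),
    l = d.keys → d.keys.Nodup →
    xs.foldl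
      (fun (st : Int × List String × PySem.Dict String (List String)) kv =>
        let c := st.1 + 1
        if kv.2 ∉ st.2.1 then
          (c, st.2.1 ++ [kv.2], st.2.2.insert kv.2 [ui_n ++ "," ++ kv.1])
        else
          (c, st.2.1, st.2.2.modify kv.2 [] (· ++ [ui_n ++ "," ++ kv.1]))) (c, l, d)
    = (c + xs.length,
       (xs.foldl (fun d kv => d.modify kv.2 [] (· ++ [ui_n ++ "," ++ kv.1])) d).keys,
       xs.foldl (fun d kv => d.modify kv.2 [] (· ++ [ui_n ++ "," ++ kv.1])) d) := by
  induction xs with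
  | nil => intro c l d hl _; simpa using hl
  | cons kv xs ih =>
    intro c l d hl hnd
    simp only [List.foldl_cons]
    by_cases hmem : kv.2 ∈ l
    · -- seen before: A modifies the dict, list unchanged; the step is the same modify
      have hcont : d.contains kv.2 = true :=
        (PySem.Dict.contains_iff_mem_keys d kv.2).mpr (hl ▸ hmem)
      have hkeys : (d.modify kv.2 [] (· ++ [ui_n ++ "," ++ kv.1])).keys = d.keys := by
        rw [PySem.Dict.keys_modify, PySem.Dict.keys_insert_of_contains _ _ hcont]
      simp only [hmem, not_true_eq_false, if_false]
      rw [ih (c + 1) l (d.modify kv.2 [] (· ++ [ui_n ++ "," ++ kv.1]))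
            (by rw [hkeys]; exact hl) (by rw [hkeys]; exact hnd)]
      simp; omega
    · -- first occurrence: A inserts a fresh key; a modify on a missing key is the same insert
      have hcont : d.contains kv.2 = false := by
        rw [PySem.Dict.contains_eq_decide_mem_keys]
        simp [← hl, hmem]
      have hmod : d.modify kv.2 [] (· ++ [ui_n ++ "," ++ kv.1])
          = d.insert kv.2 [ui_n ++ "," ++ kv.1] := by
        show d.insert kv.2 ((d.getD kv.2 []) ++ [ui_n ++ "," ++ kv.1]) = _
        rw [PySem.Dict.getD_of_not_contains _ _ hcont]
        rfl
      have hkeys : (d.insert kv.2 [ui_n ++ "," ++ kv.1]).keys = d.keys ++ [kv.2] :=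
        PySem.Dict.keys_insert_of_not_contains _ _ hcont
      simp only [hmem, not_false_eq_true, if_pos, hmod]
      rw [ih (c + 1) (l ++ [kv.2]) (d.insert kv.2 [ui_n ++ "," ++ kv.1])
            (by rw [hkeys, hl])
            (by rw [hkeys]
                exact List.Nodup.append hnd (List.nodup_singleton _)
                  (by simp [← hl, hmem]))]
      simp; omega

-- The modify-append fold, characterised: its keys are the deduped values and each key's
-- entry is the filtered, formatted group.
theorem get_template_T_fold_char (ui_n : String) (ui_tree : List (String × String)) :
    (ui_tree.foldl (fun d kv => d.modify kv.2 [] (· ++ [ui_n ++ "," ++ kv.1]))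
      (PySem.Dict.empty : PySem.Dict String (List String))).keys
        = PySem.List.dedup (ui_tree.map (·.2)) ∧
    (ui_tree.foldl (fun d kv => d.modify kv.2 [] (· ++ [ui_n ++ "," ++ kv.1]))
      (PySem.Dict.empty : PySem.Dict String (List String))).items
        = (ui_tree.foldl (fun d kv => d.modify kv.2 [] (· ++ [ui_n ++ "," ++ kv.1]))
            (PySem.Dict.empty : PySem.Dict String (List String))).keys.map (fun v =>
      (v, (ui_tree.filter (fun kv => kv.2 == v)).map (fun kv => ui_n ++ "," ++ kv.1))) := by
  set d := ui_tree.foldl (fun d kv => d.modify kv.2 [] (· ++ [ui_n ++ "," ++ kv.1]))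
      (PySem.Dict.empty : PySem.Dict String (List String)) with hd
  have hfold : d = (ui_tree.map (fun kv => (kv.2, ui_n ++ "," ++ kv.1))).foldl
      (fun d p => d.modify p.1 [] (· ++ [p.2])) PySem.Dict.empty := by
    rw [hd, List.foldl_map]
  have hnd : d.keys.Nodup := by
    rw [hd]
    have := PySem.Dict.nodup_keys_foldl_modify_key ui_tree (fun kv => kv.2) []
      (fun _ kv v => v ++ [ui_n ++ "," ++ kv.1])
      (PySem.Dict.empty : PySem.Dict String (List String)) (by simp)
    simpa using this
  have hkeys : d.keys = PySem.List.dedup (ui_tree.map (·.2)) := by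
    rw [hd]
    have := PySem.Dict.keys_foldl_modify_key ui_tree (fun kv => kv.2) []
      (fun _ kv v => v ++ [ui_n ++ "," ++ kv.1])
      (PySem.Dict.empty : PySem.Dict String (List String))
    simpa [PySem.Set.update_nil_left] using this
  refine ⟨hkeys, ?_⟩
  rw [PySem.Dict.items_eq_map_keys d hnd []]
  apply List.map_congr_left
  intro v _
  have hgetD : d.getD v [] =
      ((ui_tree.map (fun kv => (kv.2, ui_n ++ "," ++ kv.1))).filter (fun p => p.1 == v)).map (·.2) := by
    rw [hfold, PySem.Dict.getD_foldl_modify_append]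
    simp
  rw [hgetD, List.filter_map, List.map_map]
  simp [Function.comp_def]

-- ===== VERDICT (by name: the statement is the Claim_ definition above) =====
theorem get_template_T_spec : Claim_equal_get_template_T := by
  intro ui_n ui_tree _
  show get_template_T ui_n ui_tree = get_template_T_alt ui_n ui_tree
  obtain ⟨hkeys, hitems⟩ := get_template_T_fold_char ui_n ui_tree
  unfold get_template_T get_template_T_alt
  rw [get_template_T_loop_eq ui_n ui_tree 0 [] PySem.Dict.empty (by simp) (by simp)]
  simp only [hitems, hkeys]
  simp
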